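-- pv_equiv track=rewrite | github.com/RichyRotter/premig | scripts/premig_horizontal_menu.py | build_rows_manual
-- ===== SOURCE A (Python) =====
-- def build_rows_manual(tokens):
--     rows, cur = [], []
--     for kind, idx in tokens:
--         if kind == "BR":
--             rows.append(cur); cur=[]
--         else:
--             cur.append(idx)
--     rows.append(cur)
--     return rows
-- ===== SOURCE B (Python) =====
-- def build_rows_manual(tokens):
--     # One backward pass: build the rows in reverse (rows list reversed, each row
--     # reversed), then flip everything once at the end.
--     rows = [[]]
--     for kind, idx in reversed(list(tokens)):
--         if kind == "BR":
--             rows.append([])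
--         else:
--             rows[-1].append(idx)
--     return [row[::-1] for row in rows[::-1]]
-- ===== Notes on version B (the rewrite author's own statement) =====
-- stated objective: alternative
-- what changed: B replaces A's forward accumulate-and-reset pass (append current row on each BR) with a single backward pass that conses rows and row contents in reverse and flips them once at the end.
import Mathlib
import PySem

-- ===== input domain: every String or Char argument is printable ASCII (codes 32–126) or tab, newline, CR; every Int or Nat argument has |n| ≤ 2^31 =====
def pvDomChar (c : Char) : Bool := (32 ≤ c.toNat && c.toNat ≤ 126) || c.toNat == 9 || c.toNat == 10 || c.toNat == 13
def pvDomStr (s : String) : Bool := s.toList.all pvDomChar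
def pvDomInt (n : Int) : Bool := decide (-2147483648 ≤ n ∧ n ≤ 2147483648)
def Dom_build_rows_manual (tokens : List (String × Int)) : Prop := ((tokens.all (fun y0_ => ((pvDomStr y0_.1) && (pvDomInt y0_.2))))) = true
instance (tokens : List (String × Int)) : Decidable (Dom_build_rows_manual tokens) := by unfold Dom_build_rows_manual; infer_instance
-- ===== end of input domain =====

-- B builds the rows in one backward pass (rows and row contents reversed, flipped once at
-- the end) instead of A's forward accumulate-and-reset pass; objective: alternative.


-- ===== PORT A =====
def build_rows_manual (tokens : List (String × Int)) : List (List Int) :=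
  let st := tokens.foldl
    (fun (st : List (List Int) × List Int) t =>
      if t.1 == "BR" then (st.1 ++ [st.2], []) else (st.1, st.2 ++ [t.2]))
    ([], [])
  st.1 ++ [st.2]

-- ===== PORT B =====
-- one step of B's backward loop; rows is never [] (it starts as [[]] and only grows),
-- so the getLastD default is never used (Python's rows[-1] on a nonempty list)
def build_rows_manual_altStep (rows : List (List Int)) (t : String × Int) : List (List Int) :=
  if t.1 == "BR" then rows ++ [[]]
  else rows.dropLast ++ [rows.getLastD [] ++ [t.2]]

def build_rows_manual_alt (tokens : List (String × Int)) : List (List Int) :=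
  (((tokens.reverse).foldl build_rows_manual_altStep [[]]).reverse).map List.reverse

-- ===== PRECONDITION & SPEC =====
def Spec_build_rows_manual (tokens : List (String × Int)) (out : List (List Int)) : Prop := out = build_rows_manual_alt tokens
instance (tokens : List (String × Int)) (out : List (List Int)) : Decidable (Spec_build_rows_manual tokens out) := by unfold Spec_build_rows_manual; infer_instance

-- ===== CLAIM (what is proved, stated in full; the proofs are below) =====
def Claim_equal_build_rows_manual : Prop := ∀ (tokens : List (String × Int)), Dom_build_rows_manual tokens → Spec_build_rows_manual tokens (build_rows_manual tokens)

-- ===== LEMMAS AND PROOFS =====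

-- the common "split on BR" normal form, as a right fold
def pvN (tokens : List (String × Int)) : List (List Int) :=
  tokens.foldr
    (fun t rows =>
      if t.1 == "BR" then [] :: rows
      else match rows with
        | q :: qs => (t.2 :: q) :: qs
        | [] => [[t.2]])
    [[]]

theorem pvN_br (t : String × Int) (rest : List (String × Int)) (h : (t.1 == "BR") = true) :
    pvN (t :: rest) = [] :: pvN rest := by
  have h' : t.1 = "BR" := by simpa using h
  simp [pvN, h']

theorem pvN_not (t : String × Int) (rest : List (String × Int)) (h : (t.1 == "BR") = false) :
    pvN (t :: rest) = match pvN rest with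
      | q :: qs => (t.2 :: q) :: qs
      | [] => [[t.2]] := by
  have h' : ¬ t.1 = "BR" := by simpa using h
  simp [pvN, h']

theorem pvN_ne_nil (tokens : List (String × Int)) : pvN tokens ≠ [] := by
  induction tokens with
  | nil => simp [pvN]
  | cons x rest ih =>
    cases hbr : x.1 == "BR" with
    | true => rw [pvN_br _ _ hbr]; simp
    | false =>
      rw [pvN_not _ _ hbr]
      cases h : pvN rest with
      | nil => exact absurd h ih
      | cons r rs => simp

-- B's backward foldl, reversed and row-reversed, is pvN
theorem alt_eq_pvN (tokens : List (String × Int)) :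
    build_rows_manual_alt tokens = pvN tokens := by
  unfold build_rows_manual_alt
  rw [List.foldl_reverse]
  suffices h : ∀ (l : List (String × Int)),
      ((l.foldr (fun x r => build_rows_manual_altStep r x) [[]]).reverse).map List.reverse
        = pvN l ∧ l.foldr (fun x r => build_rows_manual_altStep r x) [[]] ≠ [] from
    (h tokens).1
  intro l
  induction l with
  | nil => exact ⟨by simp [pvN], by simp⟩
  | cons x rest ih =>
    obtain ⟨ih1, ih2⟩ := ih
    cases hbr : x.1 == "BR" with
    | true =>
      have hs : build_rows_manual_altStep
          (rest.foldr (fun x r => build_rows_manual_altStep r x) [[]]) x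
          = rest.foldr (fun x r => build_rows_manual_altStep r x) [[]] ++ [[]] := by
        simp [build_rows_manual_altStep, hbr]
      refine ⟨?_, ?_⟩
      · rw [List.foldr_cons, hs, pvN_br _ _ hbr, ← ih1]
        simp
      · rw [List.foldr_cons, hs]; simp
    | false =>
      obtain ⟨q, a, hq⟩ : ∃ q a,
          rest.foldr (fun x r => build_rows_manual_altStep r x) [[]] = q ++ [a] := by
        rcases List.eq_nil_or_concat
          (rest.foldr (fun x r => build_rows_manual_altStep r x) [[]]) with h | ⟨q, a, h⟩
        · exact absurd h ih2
        · exact ⟨q, a, by simpa using h⟩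
      have hs : build_rows_manual_altStep
          (rest.foldr (fun x r => build_rows_manual_altStep r x) [[]]) x
          = q ++ [a ++ [x.2]] := by
        rw [hq]
        have h' : ¬ x.1 = "BR" := by simpa using hbr
        simp [build_rows_manual_altStep, h']
      refine ⟨?_, ?_⟩
      · rw [List.foldr_cons, hs, pvN_not _ _ hbr, ← ih1, hq]
        simp
      · rw [List.foldr_cons, hs]; simp

-- A's forward fold, with arbitrary accumulated rows/current row, against pvN
theorem a_fold_eq (tokens : List (String × Int)) :
    ∀ (rows : List (List Int)) (cur : List Int),
      (tokens.foldl
        (fun (st : List (List Int) × List Int) t =>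
          if t.1 == "BR" then (st.1 ++ [st.2], []) else (st.1, st.2 ++ [t.2]))
        (rows, cur)).1
      ++ [(tokens.foldl
        (fun (st : List (List Int) × List Int) t =>
          if t.1 == "BR" then (st.1 ++ [st.2], []) else (st.1, st.2 ++ [t.2]))
        (rows, cur)).2]
      = rows ++ (match pvN tokens with
          | r :: rs => (cur ++ r) :: rs
          | [] => [cur]) := by
  induction tokens with
  | nil => intro rows cur; simp [pvN]
  | cons x rest ih =>
    intro rows cur
    cases hbr : x.1 == "BR" with
    | true =>
      rw [List.foldl_cons, if_pos hbr, ih, pvN_br _ _ hbr]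
      cases h : pvN rest with
      | nil => exact absurd h (pvN_ne_nil rest)
      | cons r rs => simp
    | false =>
      rw [List.foldl_cons, if_neg (by simp [hbr]), ih, pvN_not _ _ hbr]
      cases h : pvN rest with
      | nil => exact absurd h (pvN_ne_nil rest)
      | cons r rs => simp

-- ===== VERDICT (by name: the statement is the Claim_ definition above) =====
theorem build_rows_manual_spec : Claim_equal_build_rows_manual := by
  intro tokens _
  show build_rows_manual tokens = build_rows_manual_alt tokens
  rw [alt_eq_pvN]
  unfold build_rows_manual
  have := a_fold_eq tokens [] []
  simp only [List.nil_append] at this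
  rw [this]
  cases h : pvN tokens with
  | nil => exact absurd h (pvN_ne_nil tokens)
  | cons r rs => simp
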